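-- pv_equiv track=rewrite | github.com/bismuts-werkeleien/AoC_2023 | day15/day15.py | hesh
-- ===== SOURCE A (Python) =====
-- def get_hash(ch, curr):
--     curr += ch
--     curr *= 17
--     rem = curr % 256
--     curr = rem
--     return curr
--
-- def hesh(line):
--     res = 0
--     for seq in line:
--         curr = 0
--         for ch in map(ord, seq):
--             curr = get_hash(ch, curr)
--         res += curr
--     return res
-- ===== SOURCE B (Python) =====
-- def hesh(line):
--     # Closed-form expanded polynomial: hash(s) = (sum ord(s[j]) * 17^(len(s)-j)) % 256
--     return sum(
--         sum(ord(c) * pow(17, len(s) - j, 256) for j, c in enumerate(s)) % 256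
--         for s in line
--     )
-- ===== Notes on version B (the rewrite author's own statement) =====
-- stated objective: alternative
-- what changed: Replaces the per-character Horner-style iteration (curr = (curr+ord)*17 % 256) with a direct expanded-polynomial formula: each string's hash is computed as a single weighted sum of ord(c) * 17^(len-j) mod 256, summed over the strings.
import Mathlib
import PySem

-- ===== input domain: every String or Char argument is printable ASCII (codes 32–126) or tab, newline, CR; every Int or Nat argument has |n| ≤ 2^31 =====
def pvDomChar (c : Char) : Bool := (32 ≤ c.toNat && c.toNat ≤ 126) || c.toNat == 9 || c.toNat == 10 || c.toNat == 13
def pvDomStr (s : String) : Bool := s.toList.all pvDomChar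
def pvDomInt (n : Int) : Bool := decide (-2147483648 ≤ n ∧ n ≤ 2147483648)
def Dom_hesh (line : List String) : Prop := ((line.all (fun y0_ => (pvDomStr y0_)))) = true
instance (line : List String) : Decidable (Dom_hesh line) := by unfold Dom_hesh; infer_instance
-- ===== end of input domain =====

-- B replaces the per-character Horner iteration by the expanded polynomial
-- sum of ord(c) * 17^(len-j) mod 256 per string (alternative decomposition, same cost).

-- ===== PORT A =====
def get_hash (ch : Int) (curr : Int) : Int :=
  let curr := curr + ch
  let curr := curr * 17
  let rem := curr % 256
  rem

def hesh (line : List String) : Int :=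
  line.foldl
    (fun res seq =>
      res + (seq.toList.map (fun c => (c.toNat : Int))).foldl
              (fun curr ch => get_hash ch curr) 0)
    0

-- ===== PORT B =====
def heshOne (s : String) : Int :=
  let cs := s.toList
  let n := cs.length
  ((cs.zipIdx.map (fun p => (p.1.toNat : Int) * ((17 : Int) ^ (n - p.2) % 256))).sum) % 256

def hesh_alt (line : List String) : Int :=
  (line.map heshOne).sum

-- ===== PRECONDITION & SPEC =====
def Spec_hesh (line : List String) (out : Int) : Prop := out = hesh_alt line
instance (line : List String) (out : Int) : Decidable (Spec_hesh line out) := by unfold Spec_hesh; infer_instance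

-- ===== CLAIM (what is proved, stated in full; the proofs are below) =====
def Claim_equal_hesh : Prop := ∀ (line : List String), Dom_hesh line → Spec_hesh line (hesh line)

-- ===== LEMMAS AND PROOFS =====

-- Expanded-polynomial value: head character weighted 17^e, exponents decreasing.
def polyU : List Char → Nat → Int
  | [], _ => 0
  | c :: cs, e => (c.toNat : Int) * 17 ^ e + polyU cs (e - 1)

theorem mod_absorb (x k s : Int) : (x % 256 * k + s) % 256 = (x * k + s) % 256 := by
  rw [Int.add_emod, Int.mul_emod, Int.emod_emod_of_dvd x dvd_rfl,
      ← Int.mul_emod, ← Int.add_emod]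

theorem horner_eq_poly (cs : List Char) (acc : Int) (h : acc % 256 = acc) :
    (cs.map (fun c => (c.toNat : Int))).foldl (fun curr ch => get_hash ch curr) acc
      = (acc * 17 ^ cs.length + polyU cs cs.length) % 256 := by
  induction cs generalizing acc with
  | nil => simpa [polyU] using h.symm
  | cons c cs ih =>
    simp only [List.map_cons, List.foldl_cons]
    rw [show get_hash ((c.toNat : Int)) acc = ((acc + (c.toNat : Int)) * 17) % 256 from rfl]
    rw [ih (((acc + (c.toNat : Int)) * 17) % 256) (by
        exact Int.emod_emod_of_dvd _ dvd_rfl)]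
    show ((((acc + (c.toNat : Int)) * 17) % 256) * 17 ^ cs.length + polyU cs cs.length) % 256 = _
    rw [mod_absorb]
    simp only [polyU, List.length_cons, Nat.add_sub_cancel]
    ring_nf

theorem bsum_eq_poly (cs : List Char) (n : Nat) :
    ∀ k : Nat,
      ((cs.zipIdx k).map (fun p => (p.1.toNat : Int) * ((17 : Int) ^ (n - p.2) % 256))).sum % 256
        = polyU cs (n - k) % 256 := by
  induction cs with
  | nil => intro k; simp [polyU]
  | cons c cs ih =>
    intro k
    simp only [List.zipIdx_cons, List.map_cons, List.sum_cons]
    rw [Int.add_emod, ih (k + 1),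
        Int.mul_emod ((c.toNat : Int)) ((17 : Int) ^ (n - k) % 256),
        Int.emod_emod_of_dvd _ dvd_rfl, ← Int.mul_emod, ← Int.add_emod]
    have hk : n - (k + 1) = n - k - 1 := by omega
    rw [hk]
    rfl

theorem inner_eq (s : String) :
    (s.toList.map (fun c => (c.toNat : Int))).foldl (fun curr ch => get_hash ch curr) 0
      = heshOne s := by
  rw [horner_eq_poly s.toList 0 (by norm_num)]
  simp only [heshOne, zero_mul, zero_add]
  rw [bsum_eq_poly s.toList s.toList.length 0, Nat.sub_zero]

theorem foldl_add_map (f : String → Int) (l : List String) (acc : Int) :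
    l.foldl (fun r s => r + f s) acc = acc + (l.map f).sum := by
  induction l generalizing acc with
  | nil => simp
  | cons s l ih => simp [ih, add_assoc]

-- ===== VERDICT (by name: the statement is the Claim_ definition above) =====
theorem hesh_spec : Claim_equal_hesh := by
  intro line _
  show hesh line = hesh_alt line
  unfold hesh hesh_alt
  rw [foldl_add_map (fun s =>
        (s.toList.map (fun c => (c.toNat : Int))).foldl (fun curr ch => get_hash ch curr) 0)]
  simp [inner_eq]
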